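-- pv_equiv track=rewrite | github.com/sabafathi11/Diffusion-Classifier | clustering_diffusion_classifier.py | analyze_depth_errors
-- ===== SOURCE A (Python) =====
-- def analyze_depth_errors(true_label, predicted_label, depth_choices):
--     """Analyze at which depth the classification went wrong."""
--     if true_label == predicted_label:
--         return None  # Correct prediction, no error
--
--     # Find the first depth where the true label was excluded
--     error_depth = None
--     max_depth = max(depth_choices.keys()) if depth_choices else 0
--
--     for depth in sorted(depth_choices.keys()):
--         chosen_classes = depth_choices[depth]
--         if true_label not in chosen_classes:
--             error_depth = depth
--             break
--
--     # If true label was never excluded during hierarchy but prediction is wrong,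
--     # this means the error occurred at the final selection step
--     if error_depth is None:
--         # The error happened after the deepest hierarchical level
--         # Assign it to the "final step" which we'll call max_depth + 1
--         error_depth = max_depth + 1
--
--     return error_depth
-- ===== SOURCE B (Python) =====
-- def analyze_depth_errors(true_label, predicted_label, depth_choices):
--     """Filter the qualifying depths and take their minimum; no sorting, no early-break scan."""
--     if true_label == predicted_label:
--         return None
--     candidates = [d for d, classes in depth_choices.items() if true_label not in classes]
--     if candidates:
--         return min(candidates)
--     return (max(depth_choices) if depth_choices else 0) + 1
-- ===== Notes on version B (the rewrite author's own statement) =====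
-- stated objective: simpler
-- what changed: B replaces A's sort-the-keys-then-scan-with-early-break (plus a separately precomputed max) by a single filter of the depths whose class list excludes the true label followed by min(), with the max+1 fallback only when the filter is empty.
import Mathlib
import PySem

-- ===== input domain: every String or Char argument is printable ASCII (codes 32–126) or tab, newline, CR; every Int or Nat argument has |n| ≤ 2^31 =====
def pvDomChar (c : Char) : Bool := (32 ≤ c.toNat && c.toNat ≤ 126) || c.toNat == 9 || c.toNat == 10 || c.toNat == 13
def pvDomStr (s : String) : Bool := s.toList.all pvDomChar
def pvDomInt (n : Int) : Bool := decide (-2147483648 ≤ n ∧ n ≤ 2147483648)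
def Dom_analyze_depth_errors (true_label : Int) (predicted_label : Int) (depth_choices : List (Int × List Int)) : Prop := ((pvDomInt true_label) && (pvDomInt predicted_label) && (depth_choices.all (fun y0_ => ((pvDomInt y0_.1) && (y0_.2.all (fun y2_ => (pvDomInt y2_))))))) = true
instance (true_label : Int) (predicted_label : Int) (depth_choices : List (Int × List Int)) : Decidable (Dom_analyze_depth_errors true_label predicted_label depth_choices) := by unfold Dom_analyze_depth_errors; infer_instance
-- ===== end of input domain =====

-- B replaces A's sort-then-early-break scan by a filter of the qualifying depths followed by min();
-- objective: simpler (no sorting, one comprehension). Return-value equivalence, no side effects involved.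

-- ===== PORT A =====
-- A's for-loop with break: first depth (in sorted key order) whose class list excludes true_label.
def pvALoop (true_label : Int) (d : PySem.Dict Int (List Int)) : List Int → Option Int
  | [] => none
  | k :: rest =>
    let chosen_classes := d.getD k []        -- depth_choices[depth]; k ∈ keys so present
    if true_label ∈ chosen_classes then pvALoop true_label d rest else some k

def analyze_depth_errors (true_label : Int) (predicted_label : Int) (depth_choices : List (Int × List Int)) : Option Int :=
  if true_label == predicted_label then none
  else
    let d := PySem.Dict.ofList depth_choices
    let max_depth : Int := match PySem.List.max? d.keys (fun x => x) with
      | some m => m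
      | none => 0                            -- max(keys) if depth_choices else 0
    let error_depth := pvALoop true_label d (PySem.List.sorted d.keys (fun x => x) false)
    match error_depth with
    | some e => some e
    | none => some (max_depth + 1)

-- ===== PORT B =====
def analyze_depth_errors_alt (true_label : Int) (predicted_label : Int) (depth_choices : List (Int × List Int)) : Option Int :=
  if true_label == predicted_label then none
  else
    let d := PySem.Dict.ofList depth_choices
    let candidates := (d.items.filter (fun kv => decide (true_label ∉ kv.2))).map (·.1)
    match PySem.List.min? candidates (fun x => x) with
    | some m => some m
    | none =>
      let md : Int := match PySem.List.max? d.keys (fun x => x) with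
        | some m => m
        | none => 0
      some (md + 1)

-- ===== PRECONDITION & SPEC =====
def Spec_analyze_depth_errors (true_label : Int) (predicted_label : Int) (depth_choices : List (Int × List Int)) (out : Option Int) : Prop := out = analyze_depth_errors_alt true_label predicted_label depth_choices
instance (true_label : Int) (predicted_label : Int) (depth_choices : List (Int × List Int)) (out : Option Int) : Decidable (Spec_analyze_depth_errors true_label predicted_label depth_choices out) := by unfold Spec_analyze_depth_errors; infer_instance

-- ===== CLAIM (what is proved, stated in full; the proofs are below) =====
def Claim_equal_analyze_depth_errors : Prop := ∀ (true_label : Int) (predicted_label : Int) (depth_choices : List (Int × List Int)), Dom_analyze_depth_errors true_label predicted_label depth_choices → Spec_analyze_depth_errors true_label predicted_label depth_choices (analyze_depth_errors true_label predicted_label depth_choices)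

-- ===== LEMMAS AND PROOFS =====

-- min with identity key is a permutation invariant (as a value).
theorem pv_min?_id_eq_of_perm (xs ys : List Int) (h : xs.Perm ys) :
    PySem.List.min? xs (fun x => x) = PySem.List.min? ys (fun x => x) := by
  cases hx : PySem.List.min? xs (fun x => x) with
  | none =>
      have : xs = [] := (PySem.List.min?_eq_none_iff _ _).1 hx
      subst this
      have : ys = [] := h.nil_eq.symm
      simp [this, hx]
  | some m =>
      have hmem : m ∈ xs := PySem.List.min?_mem hx
      have hmin : ∀ y ∈ xs, m ≤ y := PySem.List.min?_isMin hx
      cases hy : PySem.List.min? ys (fun x => x) with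
      | none =>
          have : ys = [] := (PySem.List.min?_eq_none_iff _ _).1 hy
          subst this
          exact absurd (h.mem_iff.1 hmem) (by simp)
      | some m' =>
          have hmem' : m' ∈ ys := PySem.List.min?_mem hy
          have hmin' : ∀ y ∈ ys, m' ≤ y := PySem.List.min?_isMin hy
          have h1 : m ≤ m' := hmin m' (h.mem_iff.2 hmem')
          have h2 : m' ≤ m := hmin' m (h.mem_iff.1 hmem)
          have : m = m' := le_antisymm h1 h2
          simp [this]

theorem pv_foldl_min_eq_self (t : List Int) (x : Int) (h : ∀ y ∈ t, x ≤ y) :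
    t.foldl min x = x := by
  induction t with
  | nil => rfl
  | cons a t ih =>
      have hx : min x a = x := min_eq_left (h a (by simp))
      simp only [List.foldl_cons, hx]
      exact ih (fun y hy => h y (by simp [hy]))

-- A's early-break scan over a ≤-sorted list computes the min of the qualifying elements.
theorem pv_loop_eq_min (true_label : Int) (d : PySem.Dict Int (List Int)) (s : List Int)
    (hs : s.Pairwise (· ≤ ·)) :
    pvALoop true_label d s =
      PySem.List.min? (s.filter (fun k => decide (true_label ∉ d.getD k []))) (fun x => x) := by
  induction s with
  | nil => simp [pvALoop, (PySem.List.min?_eq_none_iff ([] : List Int) _).2 rfl]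
  | cons k rest ih =>
      have hhead : ∀ y ∈ rest, k ≤ y := (List.pairwise_cons.1 hs).1
      have htail := (List.pairwise_cons.1 hs).2
      by_cases hmem : true_label ∈ d.getD k []
      · simp [pvALoop, hmem, ih htail]
      · have hfil : (k :: rest).filter (fun k => decide (true_label ∉ d.getD k [])) =
            k :: rest.filter (fun k => decide (true_label ∉ d.getD k [])) := by
          simp [hmem]
        have hle : ∀ y ∈ rest.filter (fun k => decide (true_label ∉ d.getD k [])), k ≤ y := by
          intro y hy
          exact hhead y (List.mem_of_mem_filter hy)
        rw [hfil, PySem.List.min?_id_cons, pv_foldl_min_eq_self _ _ hle]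
        simp [pvALoop, hmem]

theorem analyze_depth_errors_spec : Claim_equal_analyze_depth_errors := by
  intro true_label predicted_label depth_choices _
  unfold Spec_analyze_depth_errors analyze_depth_errors analyze_depth_errors_alt
  by_cases heq : true_label == predicted_label
  · simp [heq]
  · simp only [heq, Bool.false_eq_true, if_false]
    set d := PySem.Dict.ofList depth_choices with hd
    have hnd : d.keys.Nodup := PySem.Dict.nodup_keys_ofList depth_choices
    -- candidates = keys.filter q
    have hitems : d.items = d.keys.map (fun k => (k, d.getD k [])) :=
      PySem.Dict.items_eq_map_keys d hnd []
    have hcand : (d.items.filter (fun kv => decide (true_label ∉ kv.2))).map (·.1) =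
        d.keys.filter (fun k => decide (true_label ∉ d.getD k [])) := by
      rw [hitems, List.filter_map, List.map_map]
      simp [Function.comp_def]
    -- sorted keys: permutation + order
    have hperm : (PySem.List.sorted d.keys (fun x => x) false).Perm d.keys :=
      PySem.List.sorted_perm d.keys (fun x => x) false
    have hpw : (PySem.List.sorted d.keys (fun x => x) false).Pairwise (· ≤ ·) := by
      have := PySem.List.sorted_pairwise d.keys (fun x => x)
      simpa using this
    have hloop := pv_loop_eq_min true_label d (PySem.List.sorted d.keys (fun x => x) false) hpw
    have hpermf := hperm.filter (fun k => decide (true_label ∉ d.getD k []))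
    have hminperm := pv_min?_id_eq_of_perm _ _ hpermf
    rw [hcand, hloop, hminperm]
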